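-- pv_equiv track=rewrite | github.com/sam-flahive/dyl-encryption | dyl_0.1.py | reverse_letter_output_I
-- ===== SOURCE A (Python) =====
-- list_of_letters_I = 'P+0=Ogm"K:3Dk&NrY2^oXC}9Ix|b1;RfpZu<l,6_Qv{hA-Ja)(BM>dc%He*zTF4.wyS5sjE/?it$8U£ #qL~W!7@n[]V\'G'
--
-- def reverse_letter_output_I(letter, value):
--          order_of_letters = {}
--          for let in list_of_letters_I:
--                   if value % 94 == 0:
--                            order_of_letters[let] = 94
--                   else:
--                            order_of_letters[let] = value % 94
--                   value += 1
--          return(order_of_letters[letter])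
-- ===== SOURCE B (Python) =====
-- list_of_letters_I = 'P+0=Ogm"K:3Dk&NrY2^oXC}9Ix|b1;RfpZu<l,6_Qv{hA-Ja)(BM>dc%He*zTF4.wyS5sjE/?it$8U£ #qL~W!7@n[]V\'G'
--
-- def reverse_letter_output_I(letter, value):
--     idx = list_of_letters_I.index(letter)
--     result = (value + idx) % 94
--     return result if result else 94
-- ===== Notes on version B (the rewrite author's own statement) =====
-- stated objective: simpler
-- what changed: Replaces building the full 94-entry shifted dict and looking the letter up by a direct closed-form computation: find the letter's index in the alphabet string and return (value + index) % 94, with 0 mapped to 94.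
import Mathlib
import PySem

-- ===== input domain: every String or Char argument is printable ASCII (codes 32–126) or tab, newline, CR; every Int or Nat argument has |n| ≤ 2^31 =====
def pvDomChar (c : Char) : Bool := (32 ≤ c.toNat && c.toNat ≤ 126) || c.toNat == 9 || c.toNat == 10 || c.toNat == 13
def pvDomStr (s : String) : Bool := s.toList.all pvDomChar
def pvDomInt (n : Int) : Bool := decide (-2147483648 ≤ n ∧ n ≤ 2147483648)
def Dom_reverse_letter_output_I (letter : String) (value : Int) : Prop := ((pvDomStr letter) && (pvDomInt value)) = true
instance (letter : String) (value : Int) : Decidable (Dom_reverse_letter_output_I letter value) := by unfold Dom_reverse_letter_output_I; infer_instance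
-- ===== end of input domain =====

-- B replaces A's 94-entry dict construction + lookup by direct index arithmetic ((value + index) % 94, 0 ↦ 94); same values, simpler.

-- ===== PORT A =====
def list_of_letters_I : String := "P+0=Ogm\"K:3Dk&NrY2^oXC}9Ix|b1;RfpZu<l,6_Qv{hA-Ja)(BM>dc%He*zTF4.wyS5sjE/?it$8U£ #qL~W!7@n[]V'G"

-- the loop body: state = (order_of_letters, value)
def pvStepA (st : PySem.Dict String Int × Int) (lett : Char) : PySem.Dict String Int × Int :=
  (st.1.insert (String.ofList [lett])
      (if PySem.Int.mod st.2 94 == 0 then (94 : Int) else PySem.Int.mod st.2 94),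
   st.2 + 1)

def reverse_letter_output_I (letter : String) (value : Int) : Int :=
  let order_of_letters := (list_of_letters_I.toList.foldl pvStepA (PySem.Dict.empty, value)).1
  -- order_of_letters[letter]: KeyError (= none) when letter is not a key; Pre_ excludes exactly those inputs
  (order_of_letters.get? letter).getD 0

-- ===== PORT B =====
def reverse_letter_output_I_alt (letter : String) (value : Int) : Int :=
  -- list_of_letters_I.index(letter): raises ValueError exactly when find = -1; Pre_ excludes those inputs
  let idx := PySem.Str.find list_of_letters_I letter
  let result := PySem.Int.mod (value + idx) 94
  if result ≠ 0 then result else 94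

-- ===== PRECONDITION & SPEC =====
-- Pre_: letter is one of the 94 single-character keys of A's dict; on any other letter A raises KeyError.
def Pre_reverse_letter_output_I (letter : String) (value : Int) : Prop :=
  letter ∈ list_of_letters_I.toList.map (fun c => String.ofList [c])
instance (letter : String) (value : Int) : Decidable (Pre_reverse_letter_output_I letter value) := by unfold Pre_reverse_letter_output_I; infer_instance

def pvWitness_reverse_letter_output_I : String × Int := ("P", 0)

def Spec_reverse_letter_output_I (letter : String) (value : Int) (out : Int) : Prop := out = reverse_letter_output_I_alt letter value
instance (letter : String) (value : Int) (out : Int) : Decidable (Spec_reverse_letter_output_I letter value out) := by unfold Spec_reverse_letter_output_I; infer_instance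

-- ===== CLAIM (what is proved, stated in full; the proofs are below) =====
def Claim_equal_reverse_letter_output_I : Prop := ∀ (letter : String) (value : Int), Dom_reverse_letter_output_I letter value → Pre_reverse_letter_output_I letter value → Spec_reverse_letter_output_I letter value (reverse_letter_output_I letter value)

-- ===== LEMMAS AND PROOFS =====

lemma idxOf_getElem_le (s : List Char) : ∀ (i : Nat) (h : i < s.length), s.idxOf (s[i]'h) ≤ i := by
  induction s with
  | nil => intro i h; simp at h
  | cons a t ih =>
    intro i h
    cases i with
    | zero => simp
    | succ j =>
      have hj : j < t.length := by simpa using h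
      simp only [List.getElem_cons_succ, List.idxOf_cons]
      by_cases hb : a = t[j]
      · simp [hb]
      · have := ih j hj
        rw [show (a == t[j]) = false by simp [hb]]
        simp only [cond_false]
        omega

lemma prefix_singleton_iff (l : List Char) (a : Char) : [a] <+: l ↔ l.head? = some a := by
  cases l <;> simp [List.prefix_cons_iff, eq_comm]

-- str.find of a single character = the character's first index
lemma find_singleton (s : List Char) (c : Char) (h : c ∈ s) :
    PySem.Chars.find s [c] = (s.idxOf c : Int) := by
  have hnn : 0 ≤ PySem.Chars.find s [c] := by
    rw [PySem.Chars.find_nonneg_iff]; exact (List.singleton_infix_iff c s).mpr h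
  obtain ⟨hpre, hmin⟩ := PySem.Chars.find_spec (s := s) (sub := [c]) hnn
  have hlt : (PySem.Chars.find s [c]).toNat < s.length := by
    have hle := PySem.Chars.find_le_length (s := s) (sub := [c])
    rcases lt_or_eq_of_le (Int.toNat_le.mpr hle) with h1 | h1
    · exact h1
    · exfalso
      rw [prefix_singleton_iff] at hpre
      rw [h1, List.drop_length] at hpre
      simp at hpre
  rw [prefix_singleton_iff, List.head?_drop] at hpre
  have hgc : s[(PySem.Chars.find s [c]).toNat] = c := by
    rwa [List.getElem?_eq_getElem hlt, Option.some_inj] at hpre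
  have h1 : s.idxOf c ≤ (PySem.Chars.find s [c]).toNat := by
    conv_lhs => rw [← hgc]
    exact idxOf_getElem_le s _ hlt
  have h2 : (PySem.Chars.find s [c]).toNat ≤ s.idxOf c := by
    by_contra hcon
    apply hmin _ (Nat.lt_of_not_le hcon)
    rw [prefix_singleton_iff, List.head?_drop,
      List.getElem?_eq_getElem (List.idxOf_lt_length_of_mem h), List.getElem_idxOf]
  omega

-- a key not touched by the loop keeps its value
lemma fold_get_notin (cs : List Char) (k : String) :
    ∀ (d : PySem.Dict String Int) (v : Int), (∀ c ∈ cs, String.ofList [c] ≠ k) →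
    ((cs.foldl pvStepA (d, v)).1).get? k = d.get? k := by
  induction cs with
  | nil => intro d v _; rfl
  | cons a t ih =>
    intro d v h
    simp only [List.foldl_cons]
    rw [show pvStepA (d, v) a = (d.insert (String.ofList [a])
        (if PySem.Int.mod v 94 == 0 then (94 : Int) else PySem.Int.mod v 94), v + 1) from rfl]
    rw [ih _ _ (fun c hc => h c (List.mem_cons_of_mem _ hc))]
    exact PySem.Dict.get?_insert_of_ne _ _ (Ne.symm (h a List.mem_cons_self))

-- the loop maps the key at index i of a duplicate-free alphabet to g (v + i)
lemma fold_get_mem (cs : List Char) (c : Char) :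
    ∀ (d : PySem.Dict String Int) (v : Int), c ∈ cs → cs.Nodup →
    ((cs.foldl pvStepA (d, v)).1).get? (String.ofList [c]) =
      some (if PySem.Int.mod (v + (cs.idxOf c : Int)) 94 == 0 then (94 : Int)
            else PySem.Int.mod (v + (cs.idxOf c : Int)) 94) := by
  induction cs with
  | nil => intro d v hc _; cases hc
  | cons a t ih =>
    intro d v hc hnd
    simp only [List.foldl_cons]
    rw [show pvStepA (d, v) a = (d.insert (String.ofList [a])
        (if PySem.Int.mod v 94 == 0 then (94 : Int) else PySem.Int.mod v 94), v + 1) from rfl]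
    by_cases hca : c = a
    · subst hca
      have hnt : c ∉ t := (List.nodup_cons.mp hnd).1
      rw [fold_get_notin t _ _ _ (fun c' hc' => by
        intro he
        have hcc : c' = c := by simpa using congrArg String.toList he
        exact hnt (hcc ▸ hc'))]
      rw [PySem.Dict.get?_insert_self]
      simp
    · have hct : c ∈ t := by
        rcases List.mem_cons.mp hc with h | h
        · exact absurd h hca
        · exact h
      rw [ih _ _ hct (List.nodup_cons.mp hnd).2]
      have hidx : (v + 1) + ((t.idxOf c : Nat) : Int) = v + (((a :: t).idxOf c : Nat) : Int) := by
        rw [List.idxOf_cons, show (a == c) = false by simp [mt Eq.symm hca]]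
        simp only [cond_false]
        push_cast
        ring
      rw [hidx]

-- ===== VERDICT (by name: the statement is the Claim_ definition above) =====
theorem reverse_letter_output_I_spec : Claim_equal_reverse_letter_output_I := by
  intro letter value _ hpre
  unfold Pre_reverse_letter_output_I at hpre
  obtain ⟨c, hcmem, hlet⟩ := List.mem_map.mp hpre
  subst hlet
  unfold Spec_reverse_letter_output_I
  simp only [reverse_letter_output_I, reverse_letter_output_I_alt]
  have hnd : list_of_letters_I.toList.Nodup := by decide
  rw [fold_get_mem _ c _ _ hcmem hnd]
  have hfind : PySem.Str.find list_of_letters_I (String.ofList [c])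
      = (list_of_letters_I.toList.idxOf c : Int) := by
    rw [PySem.Str.find_eq, show (String.ofList [c]).toList = [c] by simp]
    exact find_singleton _ c hcmem
  simp only [Option.getD_some, hfind]
  by_cases h0 : PySem.Int.mod (value + (list_of_letters_I.toList.idxOf c : Int)) 94 = 0 <;>
    simp [h0]  -- both if-forms agree in each case
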